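-- pv_equiv track=rewrite | github.com/shaAhame/IG_TRACKER | question_analyzer.py | get_urgency_level
-- ===== SOURCE A (Python) =====
-- def get_urgency_level(questions):
--     for q in questions:
--         if q['urgency'] == 'high':
--             return "high"
--     for q in questions:
--         if q['urgency'] == 'medium':
--             return "medium"
--     return "low"
-- ===== SOURCE B (Python) =====
-- def get_urgency_level(questions):
--     has_medium = False
--     for q in questions:
--         u = q['urgency']
--         if u == 'high':
--             return "high"
--         if u == 'medium':
--             has_medium = True
--     return "medium" if has_medium else "low"
-- ===== Notes on version B (the rewrite author's own statement) =====
-- stated objective: simpler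
-- what changed: Replaces A's two sequential scans with a single pass that returns 'high' immediately and tracks a has_medium flag, deciding medium/low after the loop.
import Mathlib
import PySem

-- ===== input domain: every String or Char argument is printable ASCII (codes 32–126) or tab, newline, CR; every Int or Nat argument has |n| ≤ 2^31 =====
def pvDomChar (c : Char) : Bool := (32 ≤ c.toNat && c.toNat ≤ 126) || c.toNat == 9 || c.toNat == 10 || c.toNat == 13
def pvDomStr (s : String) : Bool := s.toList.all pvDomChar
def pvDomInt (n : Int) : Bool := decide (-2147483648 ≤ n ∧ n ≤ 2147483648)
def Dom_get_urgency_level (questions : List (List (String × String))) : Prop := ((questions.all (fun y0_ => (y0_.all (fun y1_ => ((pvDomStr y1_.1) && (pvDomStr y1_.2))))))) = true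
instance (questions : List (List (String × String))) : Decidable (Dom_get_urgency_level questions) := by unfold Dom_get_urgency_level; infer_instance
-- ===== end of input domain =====

-- B merges A's two sequential scans into one pass (early return on 'high', a has_medium flag for the rest): simpler, same O(n) cost.


-- ===== PORT A =====
-- helper: q['urgency'] via first-match association lookup (KeyError excluded by Pre_, getD "" there)
def pvUrg (q : List (String × String)) : String := (PySem.Dict.mk q).getD "urgency" ""

-- first loop of A: return "high" on the first q with urgency 'high'
def pvLoopHigh : List (List (String × String)) → Option String
  | [] => none
  | q :: rest => if pvUrg q == "high" then some "high" else pvLoopHigh rest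

-- second loop of A
def pvLoopMedium : List (List (String × String)) → Option String
  | [] => none
  | q :: rest => if pvUrg q == "medium" then some "medium" else pvLoopMedium rest

def get_urgency_level (questions : List (List (String × String))) : String :=
  match pvLoopHigh questions with
  | some s => s
  | none =>
    match pvLoopMedium questions with
    | some s => s
    | none => "low"

-- ===== PORT B =====
-- single pass carrying the has_medium flag
def pvLoopB : List (List (String × String)) → Bool → String
  | [], hasMedium => if hasMedium then "medium" else "low"
  | q :: rest, hasMedium =>
    let u := pvUrg q
    if u == "high" then "high"
    else pvLoopB rest (hasMedium || (u == "medium"))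

def get_urgency_level_alt (questions : List (List (String × String))) : String :=
  pvLoopB questions false

-- ===== PRECONDITION & SPEC =====
-- Pre_ excludes exactly the inputs where Python raises KeyError: a question missing the 'urgency' key is reached,
-- i.e. no question with urgency 'high' precedes the first missing-key question (both A and B raise there).
def Pre_get_urgency_level (questions : List (List (String × String))) : Prop :=
  ∀ i < questions.length,
    ((PySem.Dict.mk (questions.getD i [])).get? "urgency").isSome = false →
      ∃ j < i, (PySem.Dict.mk (questions.getD j [])).getD "urgency" "" = "high"
instance (questions : List (List (String × String))) : Decidable (Pre_get_urgency_level questions) := by unfold Pre_get_urgency_level; infer_instance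
def pvWitness_get_urgency_level : (List (List (String × String))) := [[("urgency", "medium")], [("urgency", "low")]]

def Spec_get_urgency_level (questions : List (List (String × String))) (out : String) : Prop := out = get_urgency_level_alt questions
instance (questions : List (List (String × String))) (out : String) : Decidable (Spec_get_urgency_level questions out) := by unfold Spec_get_urgency_level; infer_instance

-- ===== CLAIM (what is proved, stated in full; the proofs are below) =====
def Claim_equal_get_urgency_level : Prop := ∀ (questions : List (List (String × String))), Dom_get_urgency_level questions → Pre_get_urgency_level questions → Spec_get_urgency_level questions (get_urgency_level questions)

-- ===== LEMMAS AND PROOFS =====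
theorem pvLoopMedium_some : ∀ (qs : List (List (String × String))) (s : String), pvLoopMedium qs = some s → s = "medium" := by
  intro qs
  induction qs with
  | nil => intro s h; simp [pvLoopMedium] at h
  | cons q rest ih =>
    intro s h
    by_cases hq : pvUrg q == "medium"
    · simp [pvLoopMedium, hq] at h; exact h.symm
    · rw [pvLoopMedium, if_neg hq] at h; exact ih s h

-- loop invariant: the single pass equals A's two-scan result with the flag folded in
theorem pvLoopB_eq (qs : List (List (String × String))) (hm : Bool) :
    pvLoopB qs hm =
      match pvLoopHigh qs with
      | some s => s
      | none =>
        match pvLoopMedium qs with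
        | some s => s
        | none => if hm then "medium" else "low" := by
  induction qs generalizing hm with
  | nil => simp [pvLoopB, pvLoopHigh, pvLoopMedium]
  | cons q rest ih =>
    simp only [pvLoopB, pvLoopHigh, pvLoopMedium]
    by_cases h1 : pvUrg q == "high"
    · simp [h1]
    · by_cases h2 : pvUrg q == "medium"
      · simp only [h1, h2, if_true, Bool.or_true, ih]
        cases pvLoopHigh rest <;> simp
        cases hmed : pvLoopMedium rest <;> simp
        exact pvLoopMedium_some _ _ hmed
      · simp [h1, h2, ih]

-- ===== VERDICT (by name: the statement is the Claim_ definition above) =====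
theorem get_urgency_level_spec : Claim_equal_get_urgency_level := by
  intro questions _ _
  unfold Spec_get_urgency_level get_urgency_level get_urgency_level_alt
  rw [pvLoopB_eq]
  rfl
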